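-- pv_equiv track=rewrite | github.com/alexandrasouly/algorithms_datastructures | ctci/chapter_1_arrays_strings/string_compression.py | string_compression
-- ===== SOURCE A (Python) =====
-- def string_compression(my_str: str):
--     if needs_compression(my_str):
--         compressed = []
--         counter = 1
--         for idx in range(1, len(my_str)):
--             if my_str[idx] != my_str[idx-1]:
--                 compressed.append(my_str[idx-1])
--                 compressed.append(str(counter))
--                 counter = 1
--             else:
--                 counter += 1
--         # last one
--         compressed.append(my_str[idx])
--         compressed.append(str(counter))
--
--         return ''.join(compressed)
--     return my_str
--
-- def needs_compression(my_str: str):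
--     compressed_length = 0
--     counter = 1
--     for idx in range(1, len(my_str)):
--         if my_str[idx] != my_str[idx-1]:
--             compressed_length += 1+len(str(counter))
--             counter = 1
--         else:
--             counter += 1
--     # last one
--     compressed_length += 1+len(str(counter))
--     return (compressed_length < len(my_str))
-- ===== SOURCE B (Python) =====
-- def string_compression(my_str: str):
--     # Single construction pass with a run-skipping inner scan, then one length comparison.
--     compressed = []
--     i = 0
--     n = len(my_str)
--     while i < n:
--         j = i + 1
--         while j < n and my_str[j] == my_str[i]:
--             j += 1
--         compressed.append(my_str[i] + str(j - i))
--         i = j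
--     compressed = ''.join(compressed)
--     return compressed if len(compressed) < len(my_str) else my_str
-- ===== Notes on version B (the rewrite author's own statement) =====
-- stated objective: simpler
-- what changed: Replaces A's two symmetric pairwise-comparison passes (a length-only pass in needs_compression, then a rebuild pass) by a single run-skipping two-pointer construction of the compressed string followed by one length comparison.
import Mathlib
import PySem

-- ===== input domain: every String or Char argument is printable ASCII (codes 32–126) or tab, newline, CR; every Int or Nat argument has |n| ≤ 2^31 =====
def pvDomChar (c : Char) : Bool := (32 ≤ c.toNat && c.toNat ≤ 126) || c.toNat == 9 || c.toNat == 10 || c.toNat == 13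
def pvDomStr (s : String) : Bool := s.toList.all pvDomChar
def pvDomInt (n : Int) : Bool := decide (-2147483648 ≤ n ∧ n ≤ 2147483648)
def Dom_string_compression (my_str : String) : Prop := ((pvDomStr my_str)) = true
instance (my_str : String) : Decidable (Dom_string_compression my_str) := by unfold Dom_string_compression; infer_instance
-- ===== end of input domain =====

-- B replaces A's two pairwise-comparison passes (length-only pass + rebuild pass) by one
-- run-skipping two-pointer construction of the compressed string, then a single length comparison.


-- ===== PORT A =====
-- helper of A: needs_compression (the Python helper, transliterated)
-- the 'for idx in range(1, len(my_str))' loop is a foldl over pyRange 1 n; my_str[idx] is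
-- PySem.List.pyGetD on the char list (always in range here, so the default is never used)
def needs_compression (my_str : String) : Bool :=
  let cs := my_str.toList
  let n : Int := cs.length
  let r :=
    (PySem.List.pyRange 1 n).foldl
      (fun (st : Int × Int) idx =>
        if PySem.List.pyGetD cs idx ' ' ≠ PySem.List.pyGetD cs (idx - 1) ' ' then
          (st.1 + 1 + ((PySem.Int.toChars st.2).length : Int), 1)
        else (st.1, st.2 + 1)) (0, 1)
  -- last one: compressed_length += 1 + len(str(counter))
  decide (r.1 + 1 + ((PySem.Int.toChars r.2).length : Int) < n)

-- Python builds a list of 1-char strings and str(counter) pieces and ''.joins them;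
-- ported exactly as a flat Char accumulator (''.join flattens the pieces in order).
-- After the loop Python's idx equals len-1 (the branch is only reached when the loop ran).
def string_compression (my_str : String) : String :=
  if needs_compression my_str then
    let cs := my_str.toList
    let n : Int := cs.length
    let r :=
      (PySem.List.pyRange 1 n).foldl
        (fun (st : List Char × Int) idx =>
          if PySem.List.pyGetD cs idx ' ' ≠ PySem.List.pyGetD cs (idx - 1) ' ' then
            (st.1 ++ [PySem.List.pyGetD cs (idx - 1) ' '] ++ PySem.Int.toChars st.2, 1)
          else (st.1, st.2 + 1)) ([], 1)
    String.mk (r.1 ++ [PySem.List.pyGetD cs (n - 1) ' '] ++ PySem.Int.toChars r.2)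
  else my_str

-- ===== PORT B =====
-- B's outer while advances run by run; the inner while that counts a run is the
-- takeWhile length, and advancing i to j is the dropWhile; pieces are joined flat.
def compressRuns : List Char → List Char
  | [] => []
  | c :: rest =>
    (c :: PySem.Int.toChars (1 + ((rest.takeWhile (· == c)).length : Int))) ++
      compressRuns (rest.dropWhile (· == c))
termination_by cs => cs.length
decreasing_by
  have := List.length_dropWhile_le (· == c) rest
  simp; omega

def string_compression_alt (my_str : String) : String :=
  let cs := my_str.toList
  let compressed := compressRuns cs
  if compressed.length < cs.length then String.mk compressed else my_str

-- ===== PRECONDITION & SPEC =====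
def Spec_string_compression (my_str : String) (out : String) : Prop := out = string_compression_alt my_str
instance (my_str : String) (out : String) : Decidable (Spec_string_compression my_str out) := by unfold Spec_string_compression; infer_instance

-- ===== CLAIM (what is proved, stated in full; the proofs are below) =====
def Claim_equal_string_compression : Prop := ∀ (my_str : String), Dom_string_compression my_str → Spec_string_compression my_str (string_compression my_str)

-- ===== LEMMAS AND PROOFS =====

-- structural form of both of A's loops: fold over the (prev, cur) adjacent pairs
def loopP {σ : Type} (g : σ → Char → Char → σ) : σ → Char → List Char → σ
  | st, _, [] => st
  | st, p, c :: rest => loopP g (g st p c) c rest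

-- the run encoding A emits, starting inside a run of char p seen k times
def encodeFrom : Char → Int → List Char → List Char
  | p, k, [] => p :: PySem.Int.toChars k
  | p, k, c :: rest =>
    if c = p then encodeFrom p (k + 1) rest
    else (p :: PySem.Int.toChars k) ++ encodeFrom c 1 rest

def lastC : List Char → Char
  | [] => 'x'
  | [c] => c
  | _ :: c :: t => lastC (c :: t)

def g_build (st : List Char × Int) (prev cur : Char) : List Char × Int :=
  if cur ≠ prev then (st.1 ++ [prev] ++ PySem.Int.toChars st.2, 1) else (st.1, st.2 + 1)

def g_len (st : Int × Int) (prev cur : Char) : Int × Int :=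
  if cur ≠ prev then (st.1 + 1 + ((PySem.Int.toChars st.2).length : Int), 1) else (st.1, st.2 + 1)

theorem pyGetD_cons_zero (a : Char) (xs : List Char) (d : Char) :
    PySem.List.pyGetD (a :: xs) 0 d = a := by
  simp [PySem.List.pyGetD, PySem.List.pyGet?, PySem.List.pyIdx?]

theorem pyGetD_cons_add_one (a : Char) (xs : List Char) (i : Int) (h : 0 ≤ i) (d : Char) :
    PySem.List.pyGetD (a :: xs) (i + 1) d = PySem.List.pyGetD xs i d := by
  rw [PySem.List.pyGetD_of_nonneg _ _ (by omega), PySem.List.pyGetD_of_nonneg _ _ h]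
  have : (i + 1).toNat = i.toNat + 1 := by omega
  rw [this]; rfl

theorem pyGetD_last (xs : List Char) (d : Char) (h : xs ≠ []) :
    PySem.List.pyGetD xs ((xs.length : Int) - 1) d = lastC xs := by
  induction xs with
  | nil => exact absurd rfl h
  | cons a t ih =>
    cases t with
    | nil => simpa [lastC] using pyGetD_cons_zero a [] d
    | cons b t' =>
      have h1 : ((a :: b :: t').length : Int) - 1 = (((b :: t').length : Int) - 1) + 1 := by
        simp only [List.length_cons]; push_cast; omega
      rw [h1, pyGetD_cons_add_one a _ _ (by simp) d]
      rw [ih (by simp)]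
      rfl

theorem foldl_pairs {σ : Type} (g : σ → Char → Char → σ) (d : Char) :
    ∀ (rest : List Char) (p : Char) (st : σ),
      (List.range rest.length).foldl
        (fun st (k : Nat) => g st (PySem.List.pyGetD (p :: rest) (k : Int) d)
                          (PySem.List.pyGetD (p :: rest) ((k : Int) + 1) d)) st
      = loopP g st p rest := by
  intro rest
  induction rest with
  | nil => intro p st; rfl
  | cons c t ih =>
    intro p st
    simp only [List.length_cons]
    rw [List.range_succ_eq_map, List.foldl_cons, List.foldl_map]
    have h0 : PySem.List.pyGetD (p :: c :: t) ((0 : Nat) : Int) d = p := by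
      simpa using pyGetD_cons_zero p (c :: t) d
    have h1 : PySem.List.pyGetD (p :: c :: t) (((0 : Nat) : Int) + 1) d = c := by
      rw [pyGetD_cons_add_one _ _ _ (by simp) d]
      simpa using pyGetD_cons_zero c t d
    rw [h0, h1]
    rw [PySem.List.foldl_congr_mem _ _
        (fun st (k : Nat) => g st (PySem.List.pyGetD (c :: t) (k : Int) d)
                                  (PySem.List.pyGetD (c :: t) ((k : Int) + 1) d)) _
        (by
          intro acc k hk
          have e1 : ((Nat.succ k : Nat) : Int) = (k : Int) + 1 := by push_cast; ring
          rw [e1, pyGetD_cons_add_one p _ _ (by positivity) d,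
              pyGetD_cons_add_one p _ _ (by positivity) d])]
    exact ih c (g st p c)

theorem loopP_build : ∀ (rest : List Char) (p : Char) (k : Int) (acc : List Char),
    (loopP g_build (acc, k) p rest).1 ++
      lastC (p :: rest) :: PySem.Int.toChars (loopP g_build (acc, k) p rest).2
    = acc ++ encodeFrom p k rest := by
  intro rest
  induction rest with
  | nil => intro p k acc; simp [loopP, encodeFrom, lastC]
  | cons c t ih =>
    intro p k acc
    by_cases hc : c = p
    · subst hc
      have hg : g_build (acc, k) c c = (acc, k + 1) := by simp [g_build]
      simp only [loopP, hg, encodeFrom]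
      have : lastC (c :: c :: t) = lastC (c :: t) := rfl
      rw [this]
      exact ih c (k + 1) acc
    · have hg : g_build (acc, k) p c = (acc ++ [p] ++ PySem.Int.toChars k, 1) := by
        simp [g_build, hc]
      simp only [loopP, hg, encodeFrom, if_neg hc]
      have : lastC (p :: c :: t) = lastC (c :: t) := rfl
      rw [this, ih c 1 (acc ++ [p] ++ PySem.Int.toChars k)]
      simp

theorem loopP_len : ∀ (rest : List Char) (p : Char) (k : Int) (L : Int),
    (loopP g_len (L, k) p rest).1 + 1 +
      ((PySem.Int.toChars (loopP g_len (L, k) p rest).2).length : Int)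
    = L + ((encodeFrom p k rest).length : Int) := by
  intro rest
  induction rest with
  | nil => intro p k L; simp [loopP, encodeFrom]; push_cast; omega
  | cons c t ih =>
    intro p k L
    by_cases hc : c = p
    · subst hc
      have hg : g_len (L, k) c c = (L, k + 1) := by simp [g_len]
      simp only [loopP, hg, encodeFrom]
      exact ih c (k + 1) L
    · have hg : g_len (L, k) p c = (L + 1 + ((PySem.Int.toChars k).length : Int), 1) := by
        simp [g_len, hc]
      simp only [loopP, hg, encodeFrom, if_neg hc]
      rw [ih c 1 _]
      simp only [List.length_cons, List.length_append]
      push_cast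
      omega

theorem encodeFrom_eq : ∀ (rest : List Char) (p : Char) (k : Int),
    encodeFrom p k rest =
      (p :: PySem.Int.toChars (k + ((rest.takeWhile (· == p)).length : Int))) ++
        compressRuns (rest.dropWhile (· == p)) := by
  intro rest
  induction rest with
  | nil => intro p k; simp [encodeFrom, compressRuns]
  | cons c t ih =>
    intro p k
    by_cases hc : c = p
    · subst hc
      rw [show encodeFrom c k (c :: t) = encodeFrom c (k + 1) t from by simp [encodeFrom]]
      rw [ih c (k + 1)]
      have ht : (c :: t).takeWhile (· == c) = c :: t.takeWhile (· == c) := by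
        simp
      have hd : (c :: t).dropWhile (· == c) = t.dropWhile (· == c) := by
        simp
      rw [ht, hd]
      congr 3
      simp only [List.length_cons]
      push_cast
      omega
    · rw [show encodeFrom p k (c :: t) = (p :: PySem.Int.toChars k) ++ encodeFrom c 1 t from by
        simp [encodeFrom, hc]]
      have ht : (c :: t).takeWhile (· == p) = [] := by
        simp [hc]
      have hd : (c :: t).dropWhile (· == p) = c :: t := by
        simp [hc]
      rw [ht, hd, ih c 1]
      rw [show compressRuns (c :: t)
            = (c :: PySem.Int.toChars (1 + ((t.takeWhile (· == c)).length : Int))) ++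
                compressRuns (t.dropWhile (· == c)) from by rw [compressRuns]]
      simp

theorem compressRuns_eq_encode (c : Char) (rest : List Char) :
    compressRuns (c :: rest) = encodeFrom c 1 rest := by
  rw [encodeFrom_eq, compressRuns]

theorem fold_bridge {σ : Type} (g : σ → Char → Char → σ) (d : Char) (p : Char)
    (rest : List Char) (st : σ) :
    (PySem.List.pyRange 1 (((p :: rest).length : Int))).foldl
      (fun st idx => g st (PySem.List.pyGetD (p :: rest) (idx - 1) d)
                          (PySem.List.pyGetD (p :: rest) idx d)) st
    = loopP g st p rest := by
  rw [PySem.List.pyRange_one, List.foldl_map]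
  have hlen : ((((p :: rest).length : Int)) - 1).toNat = rest.length := by
    simp only [List.length_cons]; push_cast; omega
  rw [hlen]
  rw [PySem.List.foldl_congr_mem _ _
      (fun st (k : Nat) => g st (PySem.List.pyGetD (p :: rest) (k : Int) d)
                                (PySem.List.pyGetD (p :: rest) ((k : Int) + 1) d)) _
      (by
        intro acc k hk
        have e1 : (1 : Int) + (k : Int) - 1 = (k : Int) := by omega
        have e2 : (1 : Int) + (k : Int) = (k : Int) + 1 := by omega
        rw [e1, e2])]
  exact foldl_pairs g d rest p st

theorem needs_compression_eq (my_str : String) (p : Char) (rest : List Char)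
    (hcs : my_str.toList = p :: rest) :
    needs_compression my_str
      = decide ((compressRuns (p :: rest)).length < (p :: rest).length) := by
  unfold needs_compression
  rw [hcs]
  simp only []
  rw [show (fun (st : Int × Int) idx =>
        if PySem.List.pyGetD (p :: rest) idx ' ' ≠ PySem.List.pyGetD (p :: rest) (idx - 1) ' ' then
          (st.1 + 1 + ((PySem.Int.toChars st.2).length : Int), 1)
        else (st.1, st.2 + 1))
      = (fun (st : Int × Int) idx =>
          g_len st (PySem.List.pyGetD (p :: rest) (idx - 1) ' ')
                   (PySem.List.pyGetD (p :: rest) idx ' ')) from rfl]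
  rw [fold_bridge g_len ' ' p rest (0, 1)]
  have h := loopP_len rest p 1 0
  rw [compressRuns_eq_encode]
  rw [decide_eq_decide]
  omega

theorem build_eq (my_str : String) (p : Char) (rest : List Char)
    (hcs : my_str.toList = p :: rest) :
    (let cs := my_str.toList
     let n : Int := cs.length
     let r :=
       (PySem.List.pyRange 1 n).foldl
         (fun (st : List Char × Int) idx =>
           if PySem.List.pyGetD cs idx ' ' ≠ PySem.List.pyGetD cs (idx - 1) ' ' then
             (st.1 ++ [PySem.List.pyGetD cs (idx - 1) ' '] ++ PySem.Int.toChars st.2, 1)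
           else (st.1, st.2 + 1)) ([], 1)
     r.1 ++ [PySem.List.pyGetD cs (n - 1) ' '] ++ PySem.Int.toChars r.2)
    = compressRuns (p :: rest) := by
  simp only [hcs]
  rw [show (fun (st : List Char × Int) idx =>
        if PySem.List.pyGetD (p :: rest) idx ' ' ≠ PySem.List.pyGetD (p :: rest) (idx - 1) ' ' then
          (st.1 ++ [PySem.List.pyGetD (p :: rest) (idx - 1) ' '] ++ PySem.Int.toChars st.2, 1)
        else (st.1, st.2 + 1))
      = (fun (st : List Char × Int) idx =>
          g_build st (PySem.List.pyGetD (p :: rest) (idx - 1) ' ')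
                     (PySem.List.pyGetD (p :: rest) idx ' ')) from rfl]
  rw [fold_bridge g_build ' ' p rest ([], 1)]
  rw [pyGetD_last (p :: rest) ' ' (by simp)]
  rw [compressRuns_eq_encode]
  have h := loopP_build rest p 1 []
  simpa using h

theorem string_compression_spec : Claim_equal_string_compression := by
  intro my_str _
  unfold Spec_string_compression string_compression_alt
  simp only []
  cases hcs : my_str.toList with
  | nil =>
    have hn : needs_compression my_str = false := by
      unfold needs_compression
      rw [hcs]
      decide
    rw [string_compression, hn, hcs]
    simp [compressRuns]
  | cons p rest =>
    have hneq := needs_compression_eq my_str p rest hcs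
    by_cases h : (compressRuns (p :: rest)).length < (p :: rest).length
    · rw [string_compression]
      simp only [hneq, decide_eq_true_eq]
      rw [if_pos h]
      have hb := build_eq my_str p rest hcs
      simp only [hcs] at hb
      simp only [hcs]
      rw [if_pos h]
      exact congrArg String.mk hb
    · rw [string_compression]
      simp only [hneq, decide_eq_true_eq]
      rw [if_neg h]
      rw [if_neg h]
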